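-- pv_equiv track=rewrite | github.com/FoodStandardsAgency/python-crud | components/utils.py | format_validation_message
-- ===== SOURCE A (Python) =====
-- def format_validation_message(validation_errors):
--     """Format validation errors into an HTML message."""
--     if not validation_errors:
--         return "<div class='alert alert-success'>Data is valid.</div>"
--
--     error_count = sum(1 for errors in validation_errors if errors)
--     if error_count == 0:
--         return "<div class='alert alert-success'>Data is valid.</div>"
--
--     message = f"<div class='alert alert-danger'><strong>{error_count} validation errors found:</strong><ul>"
--
--     # Show up to 5 errors
--     error_shown = 0
--     for i, errors in enumerate(validation_errors):
--         if errors and error_shown < 5: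
--             message += f"<li>Row {i+1}: "
--             message += ", ".join([f"{field}: {error}" for field, error in errors.items()])
--             message += "</li>"
--             error_shown += 1
--
--     if error_shown < error_count:
--         message += f"<li>...and {error_count - error_shown} more errors</li>"
--
--     message += "</ul></div>"
--     return message
-- ===== SOURCE B (Python) =====
-- def format_validation_message(validation_errors):
--     """Format validation errors into an HTML message."""
--     total, items = _emit(validation_errors, 1, 0)
--     if total == 0:
--         return "<div class='alert alert-success'>Data is valid.</div>"
--     return (f"<div class='alert alert-danger'><strong>{total} "
--             f"validation errors found:</strong><ul>{items}</ul></div>")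
--
--
-- def _emit(rows, row_no, shown):
--     """Recursively walk the rows once, returning (nonempty count, <li> items).
--
--     Stops descending as soon as a sixth non-empty row is met: from there it
--     only counts the remaining errors and emits the '...and N more' item."""
--     if not rows:
--         return 0, ''
--     errs, rest = rows[0], rows[1:]
--     if not errs:
--         return _emit(rest, row_no + 1, shown)
--     if shown < 5:
--         item = (f"<li>Row {row_no}: "
--                 + ', '.join(f"{f}: {e}" for f, e in errs.items())
--                 + "</li>")
--         cnt, html = _emit(rest, row_no + 1, shown + 1)
--         return cnt + 1, item + html
--     more = 1 + sum(1 for e in rest if e)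
--     return more, f"<li>...and {more} more errors</li>"
-- ===== Notes on version B (the rewrite author's own statement) =====
-- stated objective: alternative
-- what changed: B replaces A's separate counting pass plus full-length stateful display loop by one early-terminating recursion that returns a (count, html) pair, emits the '...and N more' item inside the recursion at the sixth non-empty row, and only counts (never formats) past that point.
import Mathlib
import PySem

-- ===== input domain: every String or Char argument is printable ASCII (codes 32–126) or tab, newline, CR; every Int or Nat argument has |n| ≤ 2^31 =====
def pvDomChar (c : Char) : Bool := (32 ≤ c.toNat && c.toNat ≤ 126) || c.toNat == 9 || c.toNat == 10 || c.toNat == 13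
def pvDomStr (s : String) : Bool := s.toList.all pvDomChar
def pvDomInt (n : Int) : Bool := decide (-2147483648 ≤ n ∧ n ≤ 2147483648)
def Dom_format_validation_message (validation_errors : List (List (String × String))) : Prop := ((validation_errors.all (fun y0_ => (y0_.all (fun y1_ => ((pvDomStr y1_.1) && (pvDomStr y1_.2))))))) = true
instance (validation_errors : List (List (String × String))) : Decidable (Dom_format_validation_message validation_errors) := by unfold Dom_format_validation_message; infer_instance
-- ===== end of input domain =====

-- B replaces A's counting pass + full-length display loop by a single early-terminating
-- recursion returning a (count, html) pair, emitting the '...and N more' item inside the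
-- recursion (objective: alternative decomposition, same cost).

-- ===== PORT A =====
-- ", ".join([f"{field}: {error}" for field, error in errors.items()])
def pvPairsA (errs : List (String × String)) : String :=
  PySem.Str.join ", " (errs.map (fun fe => fe.1 ++ ": " ++ fe.2))

def format_validation_message (validation_errors : List (List (String × String))) : String :=
  if validation_errors = [] then "<div class='alert alert-success'>Data is valid.</div>"
  else
    let error_count : Int :=
      validation_errors.foldl (fun acc errors => if errors ≠ [] then acc + 1 else acc) 0
    if error_count = 0 then "<div class='alert alert-success'>Data is valid.</div>"
    else
      let message := "<div class='alert alert-danger'><strong>" ++ PySem.Int.toStr error_count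
        ++ " validation errors found:</strong><ul>"
      let st := (PySem.List.enumerate validation_errors).foldl
        (fun (st : String × Int) p =>
          if p.2 ≠ [] ∧ st.2 < 5 then
            (st.1 ++ "<li>Row " ++ PySem.Int.toStr (p.1 + 1) ++ ": " ++ pvPairsA p.2 ++ "</li>",
             st.2 + 1)
          else st)
        (message, 0)
      let message := if st.2 < error_count then
          st.1 ++ "<li>...and " ++ PySem.Int.toStr (error_count - st.2) ++ " more errors</li>"
        else st.1
      message ++ "</ul></div>"

-- ===== PORT B =====
-- f"<li>Row {row_no}: " + ', '.join(f"{f}: {e}" for f, e in errs.items()) + "</li>"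
def pvItemB (r : Int) (errs : List (String × String)) : String :=
  "<li>Row " ++ PySem.Int.toStr r ++ ": "
    ++ PySem.Str.join ", " (errs.map (fun fe => fe.1 ++ ": " ++ fe.2)) ++ "</li>"

-- _emit(rows, row_no, shown): one recursion returning (nonempty count, items html);
-- past the fifth shown row it only counts the rest and emits the '...and N more' item
def pvEmit : List (List (String × String)) → Int → Int → Int × String
  | [], _, _ => (0, "")
  | errs :: rest, row_no, shown =>
    if errs = [] then pvEmit rest (row_no + 1) shown
    else if shown < 5 then
      let item := pvItemB row_no errs
      let p := pvEmit rest (row_no + 1) (shown + 1)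
      (p.1 + 1, item ++ p.2)
    else
      let more : Int := 1 + rest.foldl (fun acc e => if e ≠ [] then acc + 1 else acc) 0
      (more, "<li>...and " ++ PySem.Int.toStr more ++ " more errors</li>")

def format_validation_message_alt (validation_errors : List (List (String × String))) : String :=
  let p := pvEmit validation_errors 1 0
  if p.1 = 0 then "<div class='alert alert-success'>Data is valid.</div>"
  else "<div class='alert alert-danger'><strong>" ++ PySem.Int.toStr p.1
    ++ " validation errors found:</strong><ul>" ++ p.2 ++ "</ul></div>"

-- ===== PRECONDITION & SPEC =====
def Spec_format_validation_message (validation_errors : List (List (String × String))) (out : String) : Prop := out = format_validation_message_alt validation_errors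
instance (validation_errors : List (List (String × String))) (out : String) : Decidable (Spec_format_validation_message validation_errors out) := by unfold Spec_format_validation_message; infer_instance

-- ===== CLAIM (what is proved, stated in full; the proofs are below) =====
def Claim_equal_format_validation_message : Prop := ∀ (validation_errors : List (List (String × String))), Dom_format_validation_message validation_errors → Spec_format_validation_message validation_errors (format_validation_message validation_errors)

-- ===== LEMMAS AND PROOFS =====

theorem pvJoinEmpty_nil : PySem.Str.join "" ([] : List String) = "" := rfl

theorem pvJoinEmpty_cons (x : String) (l : List String) :
    PySem.Str.join "" (x :: l) = x ++ PySem.Str.join "" l := by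
  cases l with
  | nil =>
    simp [PySem.Str.join, PySem.Chars.join, List.intercalate, String.ofList_toList,
      String.append_empty]
  | cons y r =>
    simp only [PySem.Str.join, String.toList_empty, List.map_cons, PySem.Chars.join_cons_cons,
      List.append_nil, String.ofList_append, String.ofList_toList]

-- the filtered enumerate has as many rows as the filtered list
theorem pvCountEnum (ve : List (List (String × String))) (s : Int) :
    ((PySem.List.enumerate ve s).filter (fun p => p.2 ≠ [])).length
      = (ve.filter (fun e => e ≠ [])).length := by
  induction ve generalizing s with
  | nil => rfl
  | cons e rest ih =>
    rw [PySem.List.enumerate_cons, List.filter_cons, List.filter_cons]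
    by_cases h : e = []
    · rw [if_neg (by simp [h]), if_neg (by simp [h])]
      exact ih (s + 1)
    · rw [if_pos (by simp [h]), if_pos (by simp [h])]
      simp only [List.length_cons]
      rw [ih (s + 1)]

-- the counting fold is the filtered length
theorem pvCountFold (ve : List (List (String × String))) (c : Int) :
    ve.foldl (fun acc errors => if errors ≠ [] then acc + 1 else acc) c
      = c + ((ve.filter (fun e => e ≠ [])).length : Int) := by
  induction ve generalizing c with
  | nil => simp
  | cons e rest ih =>
    rw [List.foldl_cons, List.filter_cons]
    by_cases h : e = []
    · rw [if_neg (by simp [h]), if_neg (by simp [h])]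
      exact ih c
    · rw [if_pos (by simp [h]), if_pos (by simp [h])]
      rw [ih (c + 1)]
      simp only [List.length_cons]
      push_cast
      ring

-- shifting enumerate's start by one = bumping every index by one
theorem pvEnumShift (ve : List (List (String × String))) (s : Int) :
    PySem.List.enumerate ve (s + 1)
      = (PySem.List.enumerate ve s).map (fun p => (p.1 + 1, p.2)) := by
  induction ve generalizing s with
  | nil => rfl
  | cons e rest ih =>
    rw [PySem.List.enumerate_cons, PySem.List.enumerate_cons, List.map_cons, ih (s + 1)]

-- A's display loop, characterised: it appends the items of the first (5 - s)
-- remaining nonempty rows and bumps the counter accordingly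
theorem pvLoopA (l : List (Int × List (String × String))) (m : String) (s : Int)
    (h0 : 0 ≤ s) (h5 : s ≤ 5) :
    l.foldl
      (fun (st : String × Int) p =>
        if p.2 ≠ [] ∧ st.2 < 5 then
          (st.1 ++ "<li>Row " ++ PySem.Int.toStr (p.1 + 1) ++ ": " ++ pvPairsA p.2 ++ "</li>",
           st.2 + 1)
        else st)
      (m, s)
      = (m ++ PySem.Str.join ""
            (((l.filter (fun p => p.2 ≠ [])).take (5 - s).toNat).map
              (fun p => pvItemB (p.1 + 1) p.2)),
         s + min (5 - s) (((l.filter (fun p => p.2 ≠ [])).length : Int))) := by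
  induction l generalizing m s with
  | nil =>
    simp only [List.foldl_nil, List.filter_nil, List.take_nil, List.map_nil, pvJoinEmpty_nil,
      String.append_empty, List.length_nil, Nat.cast_zero, Prod.mk.injEq]
    exact ⟨trivial, by omega⟩
  | cons p rest ih =>
    rw [List.foldl_cons, List.filter_cons]
    by_cases hp : p.2 = []
    · rw [if_neg (show ¬(p.2 ≠ [] ∧ ((m, s) : String × Int).2 < 5) from fun h => h.1 hp),
        if_neg (show ¬(decide (p.2 ≠ []) = true) by simp [hp])]
      exact ih m s h0 h5
    · have hfp : decide (p.2 ≠ []) = true := by simp [hp]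
      by_cases hs : s < 5
      · rw [if_pos (show p.2 ≠ [] ∧ ((m, s) : String × Int).2 < 5 from ⟨hp, hs⟩), if_pos hfp]
        simp only []
        rw [ih (m ++ "<li>Row " ++ PySem.Int.toStr (p.1 + 1) ++ ": " ++ pvPairsA p.2 ++ "</li>")
          (s + 1) (by omega) (by omega)]
        have hnat : (5 - s).toNat = (5 - (s + 1)).toNat + 1 := by omega
        rw [hnat, List.take_succ_cons, List.map_cons, pvJoinEmpty_cons]
        simp only [Prod.mk.injEq, List.length_cons]
        constructor
        · simp [pvItemB, pvPairsA, String.append_assoc]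
        · push_cast
          omega
      · rw [if_neg (show ¬(p.2 ≠ [] ∧ ((m, s) : String × Int).2 < 5) from fun h => hs h.2),
          if_pos hfp]
        rw [ih m s h0 h5]
        have h55 : s = 5 := by omega
        subst h55
        simp only [Prod.mk.injEq, List.length_cons]
        constructor
        · norm_num
        · push_cast
          omega

-- B's recursion, characterised: count = filtered length; html = the items of the
-- first (5 - s) nonempty rows (numbered from r) plus the '...and N more' item
theorem pvEmitChar (l : List (List (String × String))) (r s : Int)
    (h0 : 0 ≤ s) (h5 : s ≤ 5) :
    pvEmit l r s
      = (((l.filter (fun e => e ≠ [])).length : Int),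
         PySem.Str.join ""
            ((((PySem.List.enumerate l r).filter (fun p => p.2 ≠ [])).take (5 - s).toNat).map
              (fun p => pvItemB p.1 p.2))
          ++ (if 5 - s < ((l.filter (fun e => e ≠ [])).length : Int) then
                "<li>...and "
                  ++ PySem.Int.toStr (((l.filter (fun e => e ≠ [])).length : Int) - (5 - s))
                  ++ " more errors</li>"
              else "")) := by
  induction l generalizing r s with
  | nil =>
    simp only [pvEmit, List.filter_nil, List.length_nil, Nat.cast_zero, PySem.List.enumerate_nil,
      List.take_nil, List.map_nil, pvJoinEmpty_nil]
    rw [if_neg (by omega)]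
    simp
  | cons e rest ih =>
    rw [pvEmit, PySem.List.enumerate_cons]
    by_cases he : e = []
    · have h1 : (((r, e) :: PySem.List.enumerate rest (r + 1)).filter (fun p => p.2 ≠ []))
          = (PySem.List.enumerate rest (r + 1)).filter (fun p => p.2 ≠ []) := by
        simp [he]
      have h2 : ((e :: rest).filter (fun x => x ≠ [])) = rest.filter (fun x => x ≠ []) := by
        simp [he]
      rw [if_pos he, h1, h2]
      exact ih (r + 1) s h0 h5
    · have h1 : (((r, e) :: PySem.List.enumerate rest (r + 1)).filter (fun p => p.2 ≠ []))
          = (r, e) :: (PySem.List.enumerate rest (r + 1)).filter (fun p => p.2 ≠ []) := by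
        simp [he]
      have h2 : ((e :: rest).filter (fun x => x ≠ [])) = e :: rest.filter (fun x => x ≠ []) := by
        simp [he]
      rw [if_neg he, h1, h2]
      by_cases hs : s < 5
      · rw [if_pos hs]
        simp only [ih (r + 1) (s + 1) (by omega) (by omega)]
        have hnat : (5 - s).toNat = (5 - (s + 1)).toNat + 1 := by omega
        rw [hnat, List.take_succ_cons, List.map_cons, pvJoinEmpty_cons]
        simp only [Prod.mk.injEq, List.length_cons]
        push_cast
        constructor
        · ring
        · have hiff : (5 - (s + 1) < ((rest.filter (fun e => e ≠ [])).length : Int))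
              ↔ (5 - s < ((((rest.filter (fun e => e ≠ [])).length : Nat) : Int) + 1)) := by omega
          rw [if_congr hiff rfl rfl]
          by_cases hc : 5 - s < ((((rest.filter (fun e => e ≠ [])).length : Nat) : Int) + 1)
          · rw [if_pos hc, if_pos hc]
            have heq : (((rest.filter (fun e => e ≠ [])).length : Nat) : Int) - (5 - (s + 1))
                = ((((rest.filter (fun e => e ≠ [])).length : Nat) : Int) + 1) - (5 - s) := by
              omega
            rw [heq]
            simp [String.append_assoc]
          · rw [if_neg hc, if_neg hc]
            simp
      · rw [if_neg hs]
        have h55 : s = 5 := by omega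
        subst h55
        simp only [pvCountFold, Prod.mk.injEq, List.length_cons]
        push_cast
        constructor
        · ring
        · rw [List.take_zero, List.map_nil, pvJoinEmpty_nil,
            if_pos (show (0:Int) < ((rest.filter (fun e => e ≠ [])).length : Int) + 1 by
              positivity),
            show ((rest.filter (fun e => e ≠ [])).length : Int) + 1 - 0
                = 1 + (0 + ((rest.filter (fun e => e ≠ [])).length : Int)) by ring]
          simp [String.append_assoc]

theorem format_validation_message_spec_aux (ve : List (List (String × String))) :
    format_validation_message ve = format_validation_message_alt ve := by
  unfold format_validation_message format_validation_message_alt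
  rw [pvEmitChar ve 1 0 (by omega) (by omega)]
  rw [show (1 : Int) = 0 + 1 from rfl, pvEnumShift ve 0, List.filter_map]
  simp only [pvCountFold ve 0, zero_add,
    pvLoopA (PySem.List.enumerate ve 0) _ 0 (by omega) (by omega)]
  simp only [Function.comp_def, ← List.map_take, List.map_map, sub_zero, pvCountEnum]
  by_cases hnil : ve = []
  · subst hnil
    rfl
  · rw [if_neg hnil]
    set n : Int := ((ve.filter (fun e => e ≠ [])).length : Int) with hn
    by_cases hz : n = 0
    · rw [if_pos hz, if_pos hz]
    · rw [if_neg hz, if_neg hz]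
      by_cases hbig : 5 < n
      · rw [show min (5:Int) n = 5 by omega]
        rw [if_pos hbig, if_pos hbig]
        simp [String.append_assoc]
      · rw [show min (5:Int) n = n by omega]
        rw [if_neg (lt_irrefl n), if_neg hbig]
        simp [String.append_assoc]

-- ===== VERDICT (by name: the statement is the Claim_ definition above) =====
theorem format_validation_message_spec : Claim_equal_format_validation_message := by
  intro ve _
  unfold Spec_format_validation_message
  exact format_validation_message_spec_aux ve
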